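-- pv_equiv track=rewrite | github.com/sodawaki630-ops/eror-code | Streamlit_app.py | util_fn_145
-- ===== SOURCE A (Python) =====
-- def util_fn_145(n: int) -> int:
--     """Return sum of alternating digits (+ - + -)."""
--     s = str(abs(n))
--     total = 0
--     sign = 1
--     for ch in s:
--         total += sign * int(ch)
--         sign *= -1
--     return total
-- ===== SOURCE B (Python) =====
-- def util_fn_145(n: int) -> int:
--     m = abs(n)
--     if m == 0:
--         return 0
--     acc = 0
--     sign = 1
--     d = 0
--     while m:
--         m, digit = divmod(m, 10)
--         acc += sign * digit
--         sign = -sign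
--         d += 1
--     return acc if d % 2 == 1 else -acc
-- ===== Notes on version B (the rewrite author's own statement) =====
-- stated objective: alternative
-- what changed: B replaces the string conversion and MSB-first character fold with a pure-arithmetic divmod loop that extracts digits LSB-first while counting them, then fixes the overall sign by the parity of the digit count.
import Mathlib
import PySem

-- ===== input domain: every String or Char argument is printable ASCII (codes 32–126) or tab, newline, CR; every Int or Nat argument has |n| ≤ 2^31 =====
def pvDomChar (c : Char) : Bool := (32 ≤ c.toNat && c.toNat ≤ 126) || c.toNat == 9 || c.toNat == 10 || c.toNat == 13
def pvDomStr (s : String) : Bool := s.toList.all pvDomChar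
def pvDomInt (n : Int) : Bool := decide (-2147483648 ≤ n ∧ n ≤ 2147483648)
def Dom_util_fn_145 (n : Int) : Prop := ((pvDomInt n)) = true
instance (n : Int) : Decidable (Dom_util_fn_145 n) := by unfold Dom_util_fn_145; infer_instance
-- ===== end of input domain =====

-- B replaces str(abs(n)) and the MSB-first character fold by a divmod loop that
-- extracts digits LSB-first and corrects the overall sign by digit-count parity
-- (objective: alternative — arithmetic instead of string processing).

-- ===== PORT A =====
-- int(ch): exact for decimal digit characters, the only characters str(abs(n)) produces
def pvChInt (ch : Char) : Int := (ch.toNat : Int) - 48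

def util_fn_145 (n : Int) : Int :=
  let s := PySem.Int.toStr |n|
  let r := s.toList.foldl
    (fun (st : Int × Int) ch => (st.1 + st.2 * pvChInt ch, st.2 * (-1)))
    ((0 : Int), (1 : Int))
  r.1

-- ===== PORT B =====
-- the `while m:` loop of Source B: state (acc, sign, d), digits taken LSB-first by divmod
def pvLoopB (m : Nat) (acc sign : Int) (d : Nat) : Int × Nat :=
  if m = 0 then (acc, d)
  else pvLoopB (m / 10) (acc + sign * ((m % 10 : Nat) : Int)) (-sign) (d + 1)
termination_by m
decreasing_by exact Nat.div_lt_self (by omega) (by omega)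

def util_fn_145_alt (n : Int) : Int :=
  let m := n.natAbs
  if m = 0 then 0
  else
    let r := pvLoopB m 0 1 0
    if r.2 % 2 = 1 then r.1 else -r.1

-- ===== PRECONDITION & SPEC =====
def Spec_util_fn_145 (n : Int) (out : Int) : Prop := out = util_fn_145_alt n
instance (n : Int) (out : Int) : Decidable (Spec_util_fn_145 n out) := by unfold Spec_util_fn_145; infer_instance

-- ===== CLAIM (what is proved, stated in full; the proofs are below) =====
def Claim_equal_util_fn_145 : Prop := ∀ (n : Int), Dom_util_fn_145 n → Spec_util_fn_145 n (util_fn_145 n)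

-- ===== LEMMAS AND PROOFS =====

-- MSB-first decimal digit characters of m (= Nat.toDigits 10 m, fuel eliminated)
def pvRecStr (m : Nat) : List Char :=
  if m < 10 then [Nat.digitChar m]
  else pvRecStr (m / 10) ++ [Nat.digitChar (m % 10)]
termination_by m
decreasing_by exact Nat.div_lt_self (by omega) (by omega)

-- number of decimal digits
def pvLen (m : Nat) : Nat :=
  if m < 10 then 1 else pvLen (m / 10) + 1
termination_by m
decreasing_by exact Nat.div_lt_self (by omega) (by omega)

-- MSB-first alternating digit sum (A's value) and its trailing sign (-1)^pvLen
def pvSgn (m : Nat) : Int :=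
  if m < 10 then -1 else -(pvSgn (m / 10))
termination_by m
decreasing_by exact Nat.div_lt_self (by omega) (by omega)

def pvMsum (m : Nat) : Int :=
  if m < 10 then (m : Int)
  else pvMsum (m / 10) + pvSgn (m / 10) * ((m % 10 : Nat) : Int)
termination_by m
decreasing_by exact Nat.div_lt_self (by omega) (by omega)

-- LSB-first alternating digit sum (B's accumulator)
def pvLsum (m : Nat) : Int :=
  if m < 10 then (m : Int)
  else ((m % 10 : Nat) : Int) - pvLsum (m / 10)
termination_by m
decreasing_by exact Nat.div_lt_self (by omega) (by omega)


lemma pvRecStr_eq (m : Nat) : pvRecStr m =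
    (if m < 10 then [Nat.digitChar m] else pvRecStr (m / 10) ++ [Nat.digitChar (m % 10)]) := by
  rw [pvRecStr]

lemma pvLen_eq (m : Nat) : pvLen m = (if m < 10 then 1 else pvLen (m / 10) + 1) := by
  rw [pvLen]

lemma pvSgn_eq (m : Nat) : pvSgn m = (if m < 10 then -1 else -(pvSgn (m / 10))) := by
  rw [pvSgn]

lemma pvMsum_eq (m : Nat) : pvMsum m =
    (if m < 10 then (m : Int) else pvMsum (m / 10) + pvSgn (m / 10) * ((m % 10 : Nat) : Int)) := by
  rw [pvMsum]

lemma pvLsum_eq (m : Nat) : pvLsum m =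
    (if m < 10 then (m : Int) else ((m % 10 : Nat) : Int) - pvLsum (m / 10)) := by
  rw [pvLsum]

lemma pvChInt_digitChar (m : Nat) (h : m < 10) : pvChInt (Nat.digitChar m) = (m : Int) := by
  interval_cases m <;> decide

-- Nat.toDigitsCore with enough fuel computes pvRecStr (accumulator made explicit)
lemma toDigitsCore_eq_pvRecStr (m : Nat) : ∀ f ds, m < f →
    Nat.toDigitsCore 10 f m ds = pvRecStr m ++ ds := by
  induction m using Nat.strong_induction_on with
  | _ m ih =>
    intro f ds hf
    match f, hf with
    | f + 1, _ =>
      rw [Nat.toDigitsCore]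
      by_cases h10 : m < 10
      · have hdiv : m / 10 = 0 := Nat.div_eq_of_lt h10
        have hmod : m % 10 = m := Nat.mod_eq_of_lt h10
        rw [pvRecStr_eq m, if_pos h10]
        simp [hdiv, hmod]
      · have hdiv : m / 10 ≠ 0 := by
          intro h; have := Nat.div_add_mod m 10; omega
        have hlt : m / 10 < m := Nat.div_lt_self (by omega) (by omega)
        rw [if_neg hdiv, ih (m / 10) hlt (f) _ (by omega)]
        rw [pvRecStr_eq m, if_neg h10, List.append_assoc]
        rfl

lemma toChars_natAbs (n : Int) :
    PySem.Int.toChars |n| = pvRecStr n.natAbs := by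
  have h0 : ¬ (|n| < 0) := by simp [abs_nonneg]
  rw [PySem.Int.toChars, if_neg h0]
  have ht : (|n|).toNat = n.natAbs := by
    rcases le_or_gt 0 n with h | h
    · rw [abs_of_nonneg h]; omega
    · rw [abs_of_neg h]; omega
  rw [ht, Nat.toDigits]
  have := toDigitsCore_eq_pvRecStr n.natAbs (n.natAbs + 1) [] (by omega)
  simpa using this

-- A's fold over pvRecStr from an arbitrary state
lemma foldA_recStr (m : Nat) : ∀ t s : Int,
    (pvRecStr m).foldl
      (fun (st : Int × Int) ch => (st.1 + st.2 * pvChInt ch, st.2 * (-1))) (t, s)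
    = (t + s * pvMsum m, s * pvSgn m) := by
  induction m using Nat.strong_induction_on with
  | _ m ih =>
    intro t s
    by_cases h10 : m < 10
    · rw [pvRecStr_eq m, if_pos h10, pvMsum_eq m, if_pos h10, pvSgn_eq m, if_pos h10]
      simp [List.foldl, pvChInt_digitChar m h10]
    · have hlt : m / 10 < m := Nat.div_lt_self (by omega) (by omega)
      rw [pvRecStr_eq m, if_neg h10, List.foldl_append, ih (m / 10) hlt]
      rw [pvMsum_eq m, if_neg h10, pvSgn_eq m, if_neg h10]
      have hm : m % 10 < 10 := Nat.mod_lt _ (by omega)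
      simp only [List.foldl, pvChInt_digitChar _ hm, Prod.mk.injEq]
      constructor <;> ring

-- B's loop from an arbitrary state
lemma pvLoopB_eq (m : Nat) (hm : m ≠ 0) : ∀ acc sign : Int, ∀ d : Nat,
    pvLoopB m acc sign d = (acc + sign * pvLsum m, d + pvLen m) := by
  induction m using Nat.strong_induction_on with
  | _ m ih =>
    intro acc sign d
    by_cases h10 : m < 10
    · have hdiv : m / 10 = 0 := Nat.div_eq_of_lt h10
      have hmod : m % 10 = m := Nat.mod_eq_of_lt h10
      rw [pvLoopB, if_neg hm, hdiv, hmod, pvLoopB, if_pos rfl]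
      rw [pvLsum_eq m, if_pos h10, pvLen_eq m, if_pos h10]
    · have hlt : m / 10 < m := Nat.div_lt_self (by omega) (by omega)
      have hdiv : m / 10 ≠ 0 := by
        intro h; have := Nat.div_add_mod m 10; omega
      rw [pvLoopB, if_neg hm, ih (m / 10) hlt hdiv]
      rw [pvLsum_eq m, if_neg h10, pvLen_eq m, if_neg h10]
      simp only [Prod.mk.injEq]
      exact ⟨by ring, by omega⟩

-- the MSB sum is the LSB sum times (-1)^(digit count - 1), and pvSgn = (-1)^(digit count)
lemma pvMsum_pvLsum (m : Nat) :
    (pvMsum m = (if pvLen m % 2 = 1 then pvLsum m else -pvLsum m)) ∧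
    (pvSgn m = (if pvLen m % 2 = 1 then -1 else 1)) := by
  induction m using Nat.strong_induction_on with
  | _ m ih =>
    by_cases h10 : m < 10
    · rw [pvMsum_eq m, if_pos h10, pvSgn_eq m, if_pos h10, pvLsum_eq m, if_pos h10, pvLen_eq m, if_pos h10]
      norm_num
    · have hlt : m / 10 < m := Nat.div_lt_self (by omega) (by omega)
      obtain ⟨ihm, ihs⟩ := ih (m / 10) hlt
      rw [pvMsum_eq m, if_neg h10, pvSgn_eq m, if_neg h10, pvLsum_eq m, if_neg h10,
        pvLen_eq m, if_neg h10, ihm, ihs]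
      rcases Nat.even_or_odd (pvLen (m / 10)) with he | ho
      · have h0 := Nat.even_iff.mp he
        simp only [if_neg (by omega : ¬pvLen (m / 10) % 2 = 1),
          if_pos (by omega : (pvLen (m / 10) + 1) % 2 = 1)]
        exact ⟨by ring, by norm_num⟩
      · have h1 := Nat.odd_iff.mp ho
        simp only [if_pos (by omega : pvLen (m / 10) % 2 = 1),
          if_neg (by omega : ¬(pvLen (m / 10) + 1) % 2 = 1)]
        exact ⟨by ring, by norm_num⟩

-- ===== VERDICT (by name: the statement is the Claim_ definition above) =====
theorem util_fn_145_spec : Claim_equal_util_fn_145 := by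
  intro n _
  show util_fn_145 n = util_fn_145_alt n
  unfold util_fn_145 util_fn_145_alt
  simp only [PySem.Int.toList_toStr, toChars_natAbs, foldA_recStr]
  by_cases h0 : n.natAbs = 0
  · rw [if_pos h0, h0]
    show (0 : Int) + 1 * pvMsum 0 = 0
    rw [pvMsum_eq 0]; norm_num
  · rw [if_neg h0]
    show 0 + 1 * pvMsum n.natAbs = _
    rw [pvLoopB_eq _ h0]
    obtain ⟨hm, _⟩ := pvMsum_pvLsum n.natAbs
    simp only [Nat.zero_add]
    rw [hm]
    split_ifs <;> ring
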